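/- GENERATED by tools/from_farm_form.py from prooffarm-gif/accepted/digest_file.1/Proof.lean (a worked proof of the farm's unit `digest_file.1`,
   accepted by the verdict) — do not edit. -/
import Gif.Spec.Units.digest_file_1
import Gif.Spec.AllSegs

open X86 X86.User Asan ProgX.Base ProgX.Base.Spec Gif.Spec

set_option maxRecDepth 4000
set_option maxHeartbeats 4000000

/-!
  `digest_file.1` (0x1057c0 … 0x10580b, 21 instructions; gif_driver.c:147-152): the prologue of `digest_file` (six pushes,
  `sub rsp, 40`, `r12 = gif`, `[rsp+0x18] = pixels`), the checked 4-byte loads of `gif->SWidth` and `gif->SHeight`, each followed by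
  `digest_int`. Three walks, chained by `ReachVia.trans`:

      df1_prologue  0x1057c0 … 0x1057d6 (`chk1`)      the entry to `At chk1` (built field by field) and `rdi = gif` still
      df1_first     0x1057d6 … 0x1057ee (`ret2`)      the check, the load, `digest_int`: `At ret2` by `digest_file.At.carry`
      df1_second    0x1057ee … 0x10580b               the check, the load, `digest_int` (hub `At ret4`), `mov rbx, rax`: the exit

  Behind the prologue nothing is stored but return addresses at `[RA − 96, RA − 88)` and the callees' 16 bytes below them: inside the
  window `[RA − 224, RA − 64)` of `digest_file.At.carry` (Gif/Spec/DriverCarry.lean §1). `RA` = the entry's stack pointer.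
-/

namespace Gif.Spec.digest_file_1

/-- **The prologue** (0x1057c0 … 0x1057d6, gif_driver.c:147): six pushes, `sub rsp, 40`, `mov r12, rdi`, `mov [rsp+0x18], rsi`.
Establishes the function's shared assertion `At` at the first check call (`chk1`), field by field from the walk (the stores lie
in the own stack, below the cursor: `Loose.stack`), and keeps `rdi = gif` (the argument of the check that follows). -/
theorem df1_prologue (Lay : Layout) (hLay : Lay.hi = 0x1000000) (μ : Microarch) (hμ : UserX.MicroOK μ) (u₀ : State)
    (hcode : HasCodeNat Lay u₀ Gif.L.digest_file.entry Gif.Code.code_digest_file.nat Gif.L.digest_file.size)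
    (H : Heap) (rest : List Obj) (frames : List (Nat × FrameLayout)) (F : Forest) (R : Rd) (e : State) (ret : Word)
    (he : AtEntry (conv u₀) Gif.L.digest_file.entry (digest_file.spec H rest frames F R).frame ret e)
    (hpre : (digest_file.spec H rest frames F R).pre e) :
    ReachVia Lay μ WayInv e
      (fun v => digest_file.At Gif.L.digest_file.chk1 H rest frames F R u₀ e ret v ∧ v.reg .rdi = e.reg .rdi) := by
  have he0 := he
  have hpre0 := hpre
  -- the entry's facts, the precondition
  v_entry he
  obtain ⟨henv, hcomp, hrdi, hlive, hpx1, hpx2⟩ := hpre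
  -- THE WALK: 0x1057c0 … 0x1057d6 (nine instructions, no call)
  have hvendor := hμ.vendor
  u_walk hcode [hvendor] until [Gif.L.digest_file.chk1] span [ProgX.Base.L.textLo, ProgX.Base.L.textHi] side (v_side)
  -- 0x1057d6 (chk1, gif_driver.c:151): the prologue is done
  have hbase := henv.heap.base
  have hcur := henv.ctx.cursor_range henv.heap.inv.shadow
  have hun : ShadowUntouched e.mem s_1057d1.mem := by v_untouched
  -- the footprint so far: the own stack only (twice: alone, and in front of the contract's window `*pixels`)
  have hsame0 : Mem.SameExcept [⟨(e.reg .rsp).toNat - 224, (e.reg .rsp).toNat⟩] e.mem s_1057d1.mem := by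
    u_same
  have hsame1 : Mem.SameExcept
      [⟨(e.reg .rsp).toNat - 224, (e.reg .rsp).toNat⟩,
       ⟨(e.reg .rsi).toNat, (e.reg .rsi).toNat + 8⟩] e.mem s_1057d1.mem := by
    u_same
  -- the heap's invariant: the window lies below the heap's region
  have hinv0 : HeapInv H rest frames ((e.reg .rsp).toNat + 8) s_1057d1.mem := by
    refine henv.heap.inv.sameExcept hun hsame0 ?_
    intro w hw
    have hw_eq := List.mem_singleton.mp hw
    rw [hw_eq, hbase]
    left
    left
    simp only
    omega
  -- the state invariant: the window lies in the stack region, below the cursor: loose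
  have hok1 : GifOK H F R s_1057d1.mem := by
    refine henv.ok.sameExcept henv.heap.inv.heap ⟨hcur.1, hcur.2.1⟩ hsame0 ?_
    intro w hw
    have hw_eq := List.mem_singleton.mp hw
    rw [hw_eq]
    apply Loose.stack henv.heap.inv.heap
    · simp only
      omega
    · simp only
      omega
    · simp only
      omega
  have hat : digest_file.At Gif.L.digest_file.chk1 H rest frames F R u₀ e ret s_1057d1 := {
    entry := he0
    pre := hpre0
    rip := w_rip
    rsp := w_rsp
    r12 := w_r12
    -- the six saved registers, read back from the pushes
    slot_r15 := by
      rw [w_mem]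
      u_read
    slot_r14 := by
      rw [w_mem]
      u_read
    slot_r13 := by
      rw [w_mem]
      u_read
    slot_r12 := by
      rw [w_mem]
      u_read
    slot_rbp := by
      rw [w_mem]
      u_read
    slot_rbx := by
      rw [w_mem]
      u_read
    -- the return address: every store lies below it
    slot_ra := by
      u_resolve
    slot_pixels := by
      rw [w_mem]
      u_read
    inv := hinv0.lower (by omega) (by omega) (by omega)
    ok := hok1
    un := hun
    same := hsame1
    code := ProgX.Base.conv_code_in w_eq
    abi := by
      refine ProgX.Base.abiInv_of ?_ ?_
      · rw [w_flags]
        simp only [X86.User.df_setStatus]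
        exact he_df
      · rw [w_mxcsr]
        exact he_mx
  }
  exact ReachVia.done ⟨hat, w_kept.get .rdi rfl⟩

/-- **`gif->SWidth`** (0x1057d6 … 0x1057ee, gif_driver.c:151): the check of the 4 bytes at `gif + 0` (inside the live object
`(F.gif, 120)`), the load, `digest_int(FNV offset, SWidth)`. `At` at the call's return address `ret2` by `digest_file.At.carry`:
the return addresses and the callee's 16 bytes lie in `[RA − 112, RA − 88)`. -/
theorem df1_first (Lay : Layout) (hLay : Lay.hi = 0x1000000) (μ : Microarch) (hμ : UserX.MicroOK μ) (u₀ : State)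
    (hcode : HasCodeNat Lay u₀ Gif.L.digest_file.entry Gif.Code.code_digest_file.nat Gif.L.digest_file.size)
    (h_digest_int : Calls Lay μ ProgX.Base.WayInv (ProgX.Base.conv u₀) Gif.L.digest_int.entry Gif.Spec.digest_int.spec)
    (h_asan_load4_noabort : Asan.SmallCheck Lay μ ProgX.Base.WayInv (ProgX.Base.CodeOK u₀) [.rax, .rcx, .rdx] 4
      ProgX.Base.L.__asan_load4_noabort.entry)
    (H : Heap) (rest : List Obj) (frames : List (Nat × FrameLayout)) (F : Forest) (R : Rd) (e : State) (ret : Word) (v : State)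
    (hat : digest_file.At Gif.L.digest_file.chk1 H rest frames F R u₀ e ret v)
    (hrdi_v : v.reg .rdi = e.reg .rdi) :
    ReachVia Lay μ WayInv v (digest_file.At Gif.L.digest_file.ret2 H rest frames F R u₀ e ret) := by
  -- the prelude of a segment: the entry, the pre, where `gif` is (numbers) and that it is live
  have he := hat.entry
  v_entry he
  obtain ⟨henv, hcomp, hrdi, hlive, hpx1, hpx2⟩ := hat.pre
  have hbase := henv.heap.base
  obtain ⟨hg1, hg2, hg3⟩ := hat.ok.gif_where hat.inv.heap hbase
  have hlg : LiveIn (H.liveObjs ++ rest) frames F.gif 120 :=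
    hat.ok.gif_live.liveIn rest frames (Nat.le_refl _) (Nat.le_refl _)
  -- the present state, in the walker's names
  have w_rip := hat.rip
  have c_rsp : v.reg .rsp = e.reg .rsp - 88 := hat.rsp
  have c_r12 : v.reg .r12 = e.reg .rdi := hat.r12
  have c_rdi : v.reg .rdi = e.reg .rdi := hrdi_v
  have w_eq : Mem.EqOn ProgX.Base.L.textLo ProgX.Base.L.textHi u₀.mem v.mem := ProgX.Base.conv_code_eqOn hat.code
  have hdf : v.flags .df = false := (show abiInv _ from hat.abi).1
  have hmx : v.mxcsr &&& 0x1F80 = 0x1F80 := (show abiInv _ from hat.abi).2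
  have hsse := ProgX.Base.sseOK_of_abiInv hat.abi
  have w_kept : RegsKept [.rsp] v v := RegsKept.refl _ _
  -- THE WALK: 0x1057d6 … the call at 0x1057e9 … its return address
  u_walk hcode [hμ.vendor] until [Gif.L.digest_file.ret2] span [ProgX.Base.L.textLo, ProgX.Base.L.textHi] side (v_side)
  case check_1057d6 =>
    -- 0x1057d6, gif_driver.c:151: the check of the load `gif->SWidth`: inside the object `(F.gif, 120)`
    have hun : ShadowUntouched v.mem s_1057d6.mem := by v_untouched
    exact hlg.accSmall hat.inv.shadow hun _ 4 (by decide) (by u_omega) (by u_omega)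
  case call_inv =>
    -- 0x1057e9: DF and the MXCSR masks at the call of digest_int
    have x_df : s_1057e9.flags .df = false := by
      rw [w_flags]
      exact w_df_1057d6
    have x_mx : s_1057e9.mxcsr &&& 0x1F80 = 0x1F80 := by
      rw [w_mxcsr]
      exact hmx
    exact ProgX.Base.abiInv_of x_df x_mx
  case pre_1057e9 =>
    trivial
  -- 0x1057ee (ret2): digest_int has returned; it wrote 16 bytes of stack below its return address
  v_after_call w_rsp_1057e9 w_mem_1057e9
  have hun : ShadowUntouched v.mem s_1057e9r.mem := by v_untouched
  have hsame : Mem.SameExcept [⟨(e.reg .rsp).toNat - 224, (e.reg .rsp).toNat - 64⟩] v.mem s_1057e9r.mem := by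
    u_same
  have hat' := hat.carry (cut' := Gif.L.digest_file.ret2) w_rip w_rsp (w_kept.get .r12 rfl) w_code w_inv hun hsame
  exact ReachVia.done hat'

/-- **`gif->SHeight`** (0x1057ee … 0x10580b, gif_driver.c:151-152): `rbx = h`, the check of the 4 bytes at `gif + 4` (inside the live
object `(F.gif, 120)`), the load, `digest_int(h, SHeight)` (the hub `At ret4` by `digest_file.At.carry`), `mov rbx, rax`: the
segment's exit assertion `At at_10580b` (nothing stored since the hub). -/
theorem df1_second (Lay : Layout) (hLay : Lay.hi = 0x1000000) (μ : Microarch) (hμ : UserX.MicroOK μ) (u₀ : State)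
    (hcode : HasCodeNat Lay u₀ Gif.L.digest_file.entry Gif.Code.code_digest_file.nat Gif.L.digest_file.size)
    (h_digest_int : Calls Lay μ ProgX.Base.WayInv (ProgX.Base.conv u₀) Gif.L.digest_int.entry Gif.Spec.digest_int.spec)
    (h_asan_load4_noabort : Asan.SmallCheck Lay μ ProgX.Base.WayInv (ProgX.Base.CodeOK u₀) [.rax, .rcx, .rdx] 4
      ProgX.Base.L.__asan_load4_noabort.entry)
    (H : Heap) (rest : List Obj) (frames : List (Nat × FrameLayout)) (F : Forest) (R : Rd) (e : State) (ret : Word) (v : State)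
    (hat : digest_file.At Gif.L.digest_file.ret2 H rest frames F R u₀ e ret v) :
    ReachVia Lay μ WayInv v (digest_file.At Gif.L.digest_file.at_10580b H rest frames F R u₀ e ret) := by
  -- the prelude of a segment: the entry, the pre, where `gif` is (numbers) and that it is live
  have he := hat.entry
  v_entry he
  obtain ⟨henv, hcomp, hrdi, hlive, hpx1, hpx2⟩ := hat.pre
  have hbase := henv.heap.base
  obtain ⟨hg1, hg2, hg3⟩ := hat.ok.gif_where hat.inv.heap hbase
  have hlg : LiveIn (H.liveObjs ++ rest) frames F.gif 120 :=
    hat.ok.gif_live.liveIn rest frames (Nat.le_refl _) (Nat.le_refl _)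
  -- the present state, in the walker's names
  have w_rip := hat.rip
  have c_rsp : v.reg .rsp = e.reg .rsp - 88 := hat.rsp
  have c_r12 : v.reg .r12 = e.reg .rdi := hat.r12
  have w_eq : Mem.EqOn ProgX.Base.L.textLo ProgX.Base.L.textHi u₀.mem v.mem := ProgX.Base.conv_code_eqOn hat.code
  have hdf : v.flags .df = false := (show abiInv _ from hat.abi).1
  have hmx : v.mxcsr &&& 0x1F80 = 0x1F80 := (show abiInv _ from hat.abi).2
  have hsse := ProgX.Base.sseOK_of_abiInv hat.abi
  have w_kept : RegsKept [.rsp] v v := RegsKept.refl _ _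
  -- WALK 1: 0x1057ee … the call at 0x105803 … its return address 0x105808
  u_walk hcode [hμ.vendor] until [Gif.L.digest_file.at_10580b] span [ProgX.Base.L.textLo, ProgX.Base.L.textHi] side (v_side)
  case check_1057f6 =>
    -- 0x1057f6, gif_driver.c:152: the check of the load `gif->SHeight`: inside the object `(F.gif, 120)`
    have hun : ShadowUntouched v.mem s_1057f6.mem := by v_untouched
    exact hlg.accSmall hat.inv.shadow hun _ 4 (by decide) (by u_omega) (by u_omega)
  case call_inv =>
    -- 0x105803: DF and the MXCSR masks at the call of digest_int
    have x_df : s_105803.flags .df = false := by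
      rw [w_flags]
      exact w_df_1057f6
    have x_mx : s_105803.mxcsr &&& 0x1F80 = 0x1F80 := by
      rw [w_mxcsr]
      exact hmx
    exact ProgX.Base.abiInv_of x_df x_mx
  case pre_105803 =>
    trivial
  -- 0x105808 (ret4): THE HUB. digest_int has returned; it wrote 16 bytes of stack below its return address
  v_after_call w_rsp_105803 w_mem_105803
  have hun : ShadowUntouched v.mem s_105803r.mem := by v_untouched
  have hsame : Mem.SameExcept [⟨(e.reg .rsp).toNat - 224, (e.reg .rsp).toNat - 64⟩] v.mem s_105803r.mem := by
    u_same
  have hat1 := hat.carry (cut' := Gif.L.digest_file.ret4) w_rip w_rsp (w_kept.get .r12 rfl) w_code w_inv hun hsame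
  -- `w_kept` stays relative to `v`: the hub's `r12` under a name the next walk does not clear
  have k_r12 : s_105803r.reg .r12 = v.reg .r12 := w_kept.get .r12 rfl
  -- WALK 2: `mov rbx, rax`, to the cut
  u_walk hcode [hμ.vendor] until [Gif.L.digest_file.at_10580b] span [ProgX.Base.L.textLo, ProgX.Base.L.textHi] side (v_side)
  -- 0x10580b (gif_driver.c:153): `rbx = h`; nothing was stored since the hub
  have hun2 : ShadowUntouched s_105803r.mem s_105808.mem := by
    rw [w_mem]
    exact Mem.EqOn.refl _ _ _
  have hsame2 : Mem.SameExcept [⟨(e.reg .rsp).toNat - 224, (e.reg .rsp).toNat - 64⟩] s_105803r.mem s_105808.mem := by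
    rw [w_mem]
    exact Mem.SameExcept.refl _ _
  have habi : (conv u₀).inv s_105808 := by
    refine ProgX.Base.abiInv_of ?_ ?_
    · rw [w_flags]
      exact w_df
    · rw [w_mxcsr]
      exact w_mx
  have hat2 := hat1.carry (cut' := Gif.L.digest_file.at_10580b) w_rip w_rsp ((w_kept.get .r12 rfl).trans k_r12.symm)
    (ProgX.Base.conv_code_in w_eq) habi hun2 hsame2
  exact ReachVia.done hat2

end Gif.Spec.digest_file_1

/-- Segment 1 of `digest_file` takes the function's entry (with its precondition) to `At` at 0x10580b. -/
theorem Gif.Spec.Proved.digest_file_1_ok : Gif.Spec.digest_file_1.Statement := by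
  unfold Gif.Spec.digest_file_1.Statement
  intro Lay hLay μ hμ u₀ hcode h_digest_int h_asan_load4_noabort
  intro H rest frames F R e ret he hpre
  -- 0x1057c0 … 0x1057d6: the prologue
  refine (Gif.Spec.digest_file_1.df1_prologue Lay hLay μ hμ u₀ hcode H rest frames F R e ret he hpre).trans ?_
  intro v1 hv1
  -- 0x1057d6 … 0x1057ee: `digest_int(FNV offset, gif->SWidth)`
  refine (Gif.Spec.digest_file_1.df1_first Lay hLay μ hμ u₀ hcode h_digest_int h_asan_load4_noabort H rest frames F R e ret
    v1 hv1.1 hv1.2).trans ?_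
  intro v2 hv2
  -- 0x1057ee … 0x10580b: `digest_int(h, gif->SHeight)`, `rbx = h`
  exact Gif.Spec.digest_file_1.df1_second Lay hLay μ hμ u₀ hcode h_digest_int h_asan_load4_noabort H rest frames F R e ret
    v2 hv2
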